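-- pv_equiv track=rewrite | github.com/shalgrim/advent-of-code | 2021/python/day19_1.py | distance_signatures_from_coords
-- ===== SOURCE A (Python) =====
-- def distance_signatures_from_coords(coords):
--     distance_signatures = {}
--     for i, source in enumerate(coords):
--         distance_signature = []
--         for j, dest in enumerate(coords):
--             if i == j:
--                 continue
--             distance_signature.append(
--                 frozenset({abs(source[k] - dest[k]) for k in range(3)})
--             )
--         distance_signatures[i] = distance_signature
--
--     return distance_signatures
-- ===== SOURCE B (Python) =====
-- def distance_signatures_from_coords(coords):
--     # Symmetric fill: each unordered pair's signature is computed once and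
--     # written into both points' preallocated rows at the right positions.
--     n = len(coords)
--     rows = {i: [frozenset()] * (n - 1) for i in range(n)}
--     for i in range(n):
--         xi, yi, zi = coords[i]
--         for j in range(i + 1, n):
--             xj, yj, zj = coords[j]
--             s = frozenset({abs(xi - xj), abs(yi - yj), abs(zi - zj)})
--             rows[i][j - 1] = s
--             rows[j][i] = s
--     return rows
-- ===== Notes on version B (the rewrite author's own statement) =====
-- stated objective: faster
-- what changed: Instead of recomputing a signature for every ordered pair (i,j) with an inner skip, B preallocates each point's row and loops over unordered pairs i<j once, computing each symmetric signature a single time and writing it into both rows at the correct positions.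
import Mathlib
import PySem

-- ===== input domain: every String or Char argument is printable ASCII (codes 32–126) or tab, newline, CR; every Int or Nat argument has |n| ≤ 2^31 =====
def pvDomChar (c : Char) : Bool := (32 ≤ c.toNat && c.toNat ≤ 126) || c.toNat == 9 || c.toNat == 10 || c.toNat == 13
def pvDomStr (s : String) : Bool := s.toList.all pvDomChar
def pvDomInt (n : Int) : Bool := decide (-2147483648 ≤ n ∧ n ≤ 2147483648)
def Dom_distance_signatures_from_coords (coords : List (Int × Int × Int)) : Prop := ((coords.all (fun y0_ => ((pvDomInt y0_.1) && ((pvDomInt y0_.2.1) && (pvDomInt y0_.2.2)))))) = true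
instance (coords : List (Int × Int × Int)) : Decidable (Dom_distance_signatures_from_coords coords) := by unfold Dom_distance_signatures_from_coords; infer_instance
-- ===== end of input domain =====

-- B replaces A's full n×n double scan (which builds each symmetric pair signature twice)
-- by a single pass over unordered pairs i<j that computes each signature once and writes it
-- into both points' preallocated rows; objective: faster by a constant factor.


-- ===== PORT A =====
-- The set comprehension '{abs(source[k] - dest[k]) for k in range(3)}' inserts the three
-- absolute coordinate differences in order k = 0,1,2; exact as PySem.Set.ofList of that list.
def distance_signatures_from_coords (coords : List (Int × Int × Int)) : List (Int × List (List Int)) :=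
  let ds : PySem.Dict Int (List (List Int)) :=
    (PySem.List.enumerate coords).foldl
      (fun d isrc =>
        let i := isrc.1
        let source := isrc.2
        let row : List (List Int) :=
          (PySem.List.enumerate coords).foldl
            (fun acc jdst =>
              let j := jdst.1
              let dest := jdst.2
              if i = j then acc
              else acc ++ [PySem.Set.ofList
                [|source.1 - dest.1|, |source.2.1 - dest.2.1|, |source.2.2 - dest.2.2|]])
            []
        d.insert i row)
      PySem.Dict.empty
  ds.items

-- ===== PORT B =====
-- 's = frozenset({abs(xi - xj), abs(yi - yj), abs(zi - zj)})' in Source B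
def pvPairSig (p q : Int × Int × Int) : List Int :=
  PySem.Set.ofList [|p.1 - q.1|, |p.2.1 - q.2.1|, |p.2.2 - q.2.2|]

-- 'rows[i][pos] = s' is a read–modify–write of the stored row: insert (pySetD (getD …) pos s).
def distance_signatures_from_coords_alt (coords : List (Int × Int × Int)) : List (Int × List (List Int)) :=
  let n : Int := coords.length
  let init : PySem.Dict Int (List (List Int)) :=
    (PySem.List.pyRange 0 n 1).foldl
      (fun d i => d.insert i (List.replicate (n - 1).toNat [])) PySem.Dict.empty
  let rows : PySem.Dict Int (List (List Int)) :=
    (PySem.List.pyRange 0 n 1).foldl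
      (fun d i =>
        (PySem.List.pyRange (i + 1) n 1).foldl
          (fun d j =>
            let s := pvPairSig (PySem.List.pyGetD coords i (0, 0, 0))
                              (PySem.List.pyGetD coords j (0, 0, 0))
            let d := d.insert i (PySem.List.pySetD (d.getD i []) (j - 1) s)
            d.insert j (PySem.List.pySetD (d.getD j []) i s))
          d)
      init
  rows.items

-- ===== PRECONDITION & SPEC =====
def Spec_distance_signatures_from_coords (coords : List (Int × Int × Int)) (out : List (Int × List (List Int))) : Prop := out = distance_signatures_from_coords_alt coords
instance (coords : List (Int × Int × Int)) (out : List (Int × List (List Int))) : Decidable (Spec_distance_signatures_from_coords coords out) := by unfold Spec_distance_signatures_from_coords; infer_instance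

-- ===== CLAIM (what is proved, stated in full; the proofs are below) =====
def Claim_equal_distance_signatures_from_coords : Prop := ∀ (coords : List (Int × Int × Int)), Dom_distance_signatures_from_coords coords → Spec_distance_signatures_from_coords coords (distance_signatures_from_coords coords)


-- ===== LEMMAS AND PROOFS =====

-- the signature of the (ordered) pair of points with indices i, j
def pvSg (coords : List (Int × Int × Int)) (i j : Nat) : List Int :=
  pvPairSig (coords.getD i (0, 0, 0)) (coords.getD j (0, 0, 0))

-- the final row of point i
def pvGfin (coords : List (Int × Int × Int)) (i p : Nat) : List Int :=
  if p < i then pvSg coords p i else pvSg coords i (p + 1)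

-- the canonical value both ports compute
def pvCanon (coords : List (Int × Int × Int)) (i : Nat) : Int × List (List Int) :=
  ((i : Int), (List.range i).map (fun p => pvSg coords p i) ++
    (List.range (coords.length - 1 - i)).map (fun k => pvSg coords i (i + 1 + k)))

theorem pvSg_symm (coords : List (Int × Int × Int)) (a b : Nat) :
    pvSg coords a b = pvSg coords b a := by
  simp [pvSg, pvPairSig, abs_sub_comm]

theorem pvRow_bridge (coords : List (Int × Int × Int)) (i : Nat)
    (hi : i < coords.length) :
    (List.range (coords.length - 1)).map (pvGfin coords i) = (pvCanon coords i).2 := by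
  have hsplit : coords.length - 1 = i + (coords.length - 1 - i) := by omega
  rw [pvCanon]
  conv_lhs => rw [hsplit, List.range_add, List.map_append, List.map_map]
  congr 1
  · refine List.map_congr_left (fun p hp => ?_)
    have hp' : p < i := List.mem_range.mp hp
    simp [pvGfin, hp']
  · refine List.map_congr_left (fun k _ => ?_)
    have h1 : ¬ (i + k < i) := by omega
    have h2 : i + k + 1 = i + 1 + k := by omega
    simp [pvGfin, Function.comp, h1, h2]

theorem pvFoldl_skip {P : Int → Prop} [DecidablePred P] (F : Int → List Int) :
    ∀ (l : List Int) (acc : List (List Int)),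
      l.foldl (fun acc j => if P j then acc else acc ++ [F j]) acc =
        acc ++ (l.filter (fun j => decide (¬ P j))).map F := by
  intro l
  induction l with
  | nil => simp
  | cons x xs ih =>
    intro acc
    by_cases hx : P x <;> simp [List.foldl_cons, hx, ih]

-- ===== A characterised =====

theorem pvRowA (coords : List (Int × Int × Int)) (i : Nat) (hi : i < coords.length)
    (src : Int × Int × Int) (hsrc : src = coords.getD i (0, 0, 0)) :
    (PySem.List.enumerate coords).foldl
      (fun acc b => if (i : Int) = b.1 then acc
        else acc ++ [PySem.Set.ofList
          [|src.1 - b.2.1|, |src.2.1 - b.2.2.1|, |src.2.2 - b.2.2.2|]]) []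
      = (pvCanon coords i).2 := by
  rw [PySem.List.enumerate_eq_map_pyRange coords (0, 0, 0), List.foldl_map]
  rw [pvFoldl_skip (P := fun j => (i : Int) = j)
    (F := fun j => PySem.Set.ofList
      [|src.1 - (PySem.List.pyGetD coords j (0, 0, 0)).1|,
       |src.2.1 - (PySem.List.pyGetD coords j (0, 0, 0)).2.1|,
       |src.2.2 - (PySem.List.pyGetD coords j (0, 0, 0)).2.2|])]
  have h0i : (0 : Int) ≤ (i : Int) := by positivity
  have hin : (i : Int) ≤ PySem.List.len coords := by
    simp [PySem.List.len]; exact_mod_cast hi.le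
  have hin' : (i : Int) + 1 ≤ PySem.List.len coords := by
    simp [PySem.List.len]; exact_mod_cast hi
  rw [PySem.List.pyRange_one_append 0 (i : Int) _ h0i hin,
      PySem.List.pyRange_one_append (i : Int) ((i : Int) + 1) _ (by omega) hin']
  rw [List.filter_append, List.filter_append]
  have hf1 : (PySem.List.pyRange 0 (i : Int)).filter
      (fun j => decide ¬ (i : Int) = j) = PySem.List.pyRange 0 (i : Int) := by
    refine List.filter_eq_self.mpr fun j hj => ?_
    have := PySem.List.mem_pyRange_one.mp hj
    simp; omega
  have hf2 : (PySem.List.pyRange (i : Int) ((i : Int) + 1)).filter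
      (fun j => decide ¬ (i : Int) = j) = [] := by
    rw [PySem.List.pyRange_one_singleton]; simp
  have hf3 : (PySem.List.pyRange ((i : Int) + 1) (PySem.List.len coords)).filter
      (fun j => decide ¬ (i : Int) = j) = PySem.List.pyRange ((i : Int) + 1) (PySem.List.len coords) := by
    refine List.filter_eq_self.mpr fun j hj => ?_
    have := PySem.List.mem_pyRange_one.mp hj
    simp; omega
  rw [hf1, hf2, hf3]
  simp only [List.map_append, List.nil_append]
  rw [pvCanon]
  congr 1
  · rw [PySem.List.pyRange_zero_natCast, List.map_map]
    refine List.map_congr_left fun p hp => ?_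
    have hp' : p < i := List.mem_range.mp hp
    rw [pvSg_symm]
    simp [Function.comp, pvSg, pvPairSig, PySem.List.pyGetD_natCast, hsrc]
  · rw [PySem.List.pyRange_one]
    have hlen : ((PySem.List.len coords) - ((i : Int) + 1)).toNat = coords.length - 1 - i := by
      simp [PySem.List.len]; omega
    rw [hlen, List.map_map]
    refine List.map_congr_left fun k _ => ?_
    have hcast : ((i : Int) + 1 + (k : Int)) = ((i + 1 + k : Nat) : Int) := by push_cast; ring
    simp only [Function.comp, hcast, PySem.List.pyGetD_natCast]
    simp [pvSg, pvPairSig, hsrc]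

theorem pvA_eq (coords : List (Int × Int × Int)) :
    distance_signatures_from_coords coords =
      (List.range coords.length).map (pvCanon coords) := by
  have hfresh : ∀ a ∈ PySem.List.enumerate coords,
      (PySem.Dict.empty : PySem.Dict Int (List (List Int))).contains a.1 = false :=
    fun a _ => PySem.Dict.contains_empty a.1
  have hnodup : ((PySem.List.enumerate coords).map (fun a => a.1)).Nodup := by
    rw [PySem.List.map_fst_enumerate]; exact PySem.List.nodup_pyRange_one _ _
  simp only [distance_signatures_from_coords]
  rw [PySem.Dict.items_foldl_insert_fresh _ _ _ _ hfresh hnodup]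
  have hemp : (PySem.Dict.empty : PySem.Dict Int (List (List Int))).items = [] := rfl
  rw [hemp, List.nil_append]
  refine List.ext_getElem (by simp [PySem.List.length_enumerate]) fun k hk1 hk2 => ?_
  simp only [List.getElem_map, List.getElem_range]
  have hk : k < coords.length := by
    simpa [PySem.List.length_enumerate] using hk1
  rw [PySem.List.getElem_enumerate]
  simp only [zero_add]
  have hrow := pvRowA coords k hk coords[k] (by rw [List.getD_eq_getElem _ _ hk])
  exact Prod.ext rfl hrow


-- ===== B characterised =====

def pvInv (coords : List (Int × Int × Int)) (G : Nat → Nat → List Int)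
    (d : PySem.Dict Int (List (List Int))) : Prop :=
  d.items = (List.range coords.length).map
      (fun (i : Nat) => ((i : Int), (List.range (coords.length - 1)).map (G i))) ∧
  d.keys.Nodup

theorem pvInv_congr {coords : List (Int × Int × Int)} {G G' : Nat → Nat → List Int}
    {d : PySem.Dict Int (List (List Int))} (h : pvInv coords G d)
    (hGG : ∀ i < coords.length, ∀ p < coords.length - 1, G i p = G' i p) :
    pvInv coords G' d := by
  refine ⟨h.1.trans (List.map_congr_left fun i hi => ?_), h.2⟩
  have hi' := List.mem_range.mp hi
  exact congrArg (Prod.mk (i : Int)) (List.map_congr_left fun p hp =>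
    hGG i hi' p (List.mem_range.mp hp))

theorem pvInv_getD {coords : List (Int × Int × Int)} {G : Nat → Nat → List Int}
    {d : PySem.Dict Int (List (List Int))} (h : pvInv coords G d) {k : Nat}
    (hk : k < coords.length) :
    d.getD (k : Int) [] = (List.range (coords.length - 1)).map (G k) := by
  refine PySem.Dict.getD_of_mem_items d ?_ h.2 []
  rw [h.1]
  exact List.mem_map.mpr ⟨k, List.mem_range.mpr hk, rfl⟩

theorem pvInv_insert {coords : List (Int × Int × Int)} {G : Nat → Nat → List Int}
    {d : PySem.Dict Int (List (List Int))} (h : pvInv coords G d) {k : Nat}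
    (hk : k < coords.length) (f : Nat → List Int) :
    pvInv coords (fun i => if i = k then f else G i)
      (d.insert (k : Int) ((List.range (coords.length - 1)).map f)) := by
  have hmem : ((k : Int), (List.range (coords.length - 1)).map (G k)) ∈ d.items := by
    rw [h.1]; exact List.mem_map.mpr ⟨k, List.mem_range.mpr hk, rfl⟩
  have hcont : d.contains (k : Int) = true :=
    (PySem.Dict.contains_iff_mem_keys d _).mpr (PySem.Dict.mem_keys_of_mem_items d hmem)
  constructor
  · rw [PySem.Dict.items_insert_of_contains d _ hcont, h.1, List.map_map]
    refine List.map_congr_left fun i _ => ?_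
    by_cases hik : i = k
    · subst hik; simp
    · have : ¬ ((i : Int) == (k : Int)) = true := by
        simp; exact hik
      simp [Function.comp, this, hik]
  · exact PySem.Dict.nodup_keys_insert d _ _ h.2

theorem pvSet_map_range {k p : Nat} (f : Nat → List Int) (v : List Int) (_hp : p < k) :
    ((List.range k).map f).set p v = (List.range k).map (fun q => if q = p then v else f q) := by
  refine List.ext_getElem (by simp) fun q hq1 hq2 => ?_
  simp only [List.length_set, List.length_map, List.length_range] at hq1
  rw [List.getElem_set]
  simp only [List.getElem_map, List.getElem_range]
  rcases eq_or_ne p q with h | h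
  · subst h; simp
  · simp [h, Ne.symm h]

def pvGpart (coords : List (Int × Int × Int)) (m0 i p : Nat) : List Int :=
  if i < m0 then pvGfin coords i p else if p < m0 then pvSg coords p i else []

def pvStepInner (coords : List (Int × Int × Int)) (i : Int) :
    PySem.Dict Int (List (List Int)) → Int → PySem.Dict Int (List (List Int)) :=
  fun d j =>
    (d.insert i (PySem.List.pySetD (d.getD i []) (j - 1)
      (pvPairSig (PySem.List.pyGetD coords i (0, 0, 0)) (PySem.List.pyGetD coords j (0, 0, 0))))).insert j
      (PySem.List.pySetD
        ((d.insert i (PySem.List.pySetD (d.getD i []) (j - 1)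
          (pvPairSig (PySem.List.pyGetD coords i (0, 0, 0)) (PySem.List.pyGetD coords j (0, 0, 0))))).getD j [])
        i
        (pvPairSig (PySem.List.pyGetD coords i (0, 0, 0)) (PySem.List.pyGetD coords j (0, 0, 0))))

def pvStepOuter (coords : List (Int × Int × Int)) :
    PySem.Dict Int (List (List Int)) → Int → PySem.Dict Int (List (List Int)) :=
  fun d i =>
    (PySem.List.pyRange (i + 1) (coords.length : Int)).foldl (pvStepInner coords i) d

theorem pvInner (coords : List (Int × Int × Int)) (m : Nat) (hm : m < coords.length) :
    ∀ (fuel j0 : Nat), m < j0 → fuel = coords.length - j0 →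
    ∀ (G : Nat → Nat → List Int) (d : PySem.Dict Int (List (List Int))), pvInv coords G d →
    pvInv coords
      (fun i p => if i = m then (if j0 ≤ p + 1 then pvSg coords m (p + 1) else G m p)
                  else if j0 ≤ i ∧ p = m then pvSg coords m i else G i p)
      ((PySem.List.pyRange (j0 : Int) (coords.length : Int)).foldl (pvStepInner coords (m : Int)) d) := by
  intro fuel
  induction fuel with
  | zero =>
    intro j0 hj0 hfuel G d h
    have hge : coords.length ≤ j0 := by omega
    rw [PySem.List.pyRange_one_eq_nil (by exact_mod_cast hge)]
    refine pvInv_congr h fun i hi p hp => ?_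
    by_cases him : i = m
    · rw [if_pos him, if_neg (by omega), him]
    · rw [if_neg him, if_neg (by omega)]
  | succ fuel ih =>
    intro j0 hj0 hfuel G d h
    have hj0n : j0 < coords.length := by omega
    rw [PySem.List.pyRange_one_cons (by exact_mod_cast hj0n), List.foldl_cons]
    -- one inner iteration
    have hs : pvPairSig (PySem.List.pyGetD coords (m : Int) (0, 0, 0))
        (PySem.List.pyGetD coords (j0 : Int) (0, 0, 0)) = pvSg coords m j0 := by
      simp [pvSg, PySem.List.pyGetD_natCast]
    have hgm := pvInv_getD h hm
    have hcast1 : ((j0 : Int) - 1) = ((j0 - 1 : Nat) : Int) := by omega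
    have hstep1 : PySem.List.pySetD (d.getD (m : Int) []) ((j0 : Int) - 1)
        (pvPairSig (PySem.List.pyGetD coords (m : Int) (0, 0, 0))
          (PySem.List.pyGetD coords (j0 : Int) (0, 0, 0)))
        = (List.range (coords.length - 1)).map
            (fun q => if q = j0 - 1 then pvSg coords m j0 else G m q) := by
      rw [hgm, hs, hcast1, PySem.List.pySetD_natCast, pvSet_map_range _ _ (by omega)]
    have h1 : pvInv coords
        (fun i => if i = m then (fun q => if q = j0 - 1 then pvSg coords m j0 else G m q) else G i)
        (d.insert (m : Int) (PySem.List.pySetD (d.getD (m : Int) []) ((j0 : Int) - 1)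
          (pvPairSig (PySem.List.pyGetD coords (m : Int) (0, 0, 0))
            (PySem.List.pyGetD coords (j0 : Int) (0, 0, 0))))) := by
      rw [hstep1]; exact pvInv_insert h hm _
    have hgj := pvInv_getD h1 hj0n
    have hstep2 : PySem.List.pySetD
        ((d.insert (m : Int) (PySem.List.pySetD (d.getD (m : Int) []) ((j0 : Int) - 1)
          (pvPairSig (PySem.List.pyGetD coords (m : Int) (0, 0, 0))
            (PySem.List.pyGetD coords (j0 : Int) (0, 0, 0))))).getD (j0 : Int) []) (m : Int)
        (pvPairSig (PySem.List.pyGetD coords (m : Int) (0, 0, 0))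
          (PySem.List.pyGetD coords (j0 : Int) (0, 0, 0)))
        = (List.range (coords.length - 1)).map
            (fun q => if q = m then pvSg coords m j0 else G j0 q) := by
      rw [hgj, hs, PySem.List.pySetD_natCast, pvSet_map_range _ _ (by omega)]
      refine List.map_congr_left fun q _ => ?_
      by_cases hq : q = m <;> simp [hq, show ¬ j0 = m by omega]
    have h2 : pvInv coords
        (fun i => if i = j0 then (fun q => if q = m then pvSg coords m j0 else G j0 q)
                  else if i = m then (fun q => if q = j0 - 1 then pvSg coords m j0 else G m q) else G i)
        (pvStepInner coords (m : Int) d (j0 : Int)) := by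
      rw [pvStepInner, hstep2]
      exact pvInv_insert h1 hj0n _
    have hcast2 : ((j0 : Int) + 1) = ((j0 + 1 : Nat) : Int) := by push_cast; ring
    rw [hcast2]
    have hres := ih (j0 + 1) (by omega) (by omega) _ _ h2
    refine pvInv_congr hres fun i hi p hp => ?_
    have hmj0 : ¬ (m = j0) := by omega
    by_cases him : i = m
    · by_cases hc : j0 ≤ p
      · simp [him, show j0 + 1 ≤ p + 1 by omega, show j0 ≤ p + 1 by omega]
      · by_cases hc2 : p + 1 = j0
        · have e1 : p = j0 - 1 := by omega
          simp [him, hmj0, e1, show j0 - 1 + 1 = j0 by omega]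
        · simp [him, hmj0, show ¬ j0 + 1 ≤ p + 1 by omega, show ¬ j0 ≤ p + 1 by omega,
            show ¬ p = j0 - 1 by omega]
    · by_cases hij0 : i = j0
      · by_cases hpm : p = m
        · simp [hij0, hpm, show ¬ j0 + 1 ≤ j0 by omega, show ¬ j0 = m by omega]
        · simp [hij0, hpm, show ¬ j0 + 1 ≤ j0 by omega, show ¬ j0 = m by omega]
      · by_cases hpm : p = m
        · by_cases hge : j0 ≤ i
          · simp [him, hpm, show j0 + 1 ≤ i by omega, hge]
          · simp only [if_neg him, if_neg hij0]
            rw [if_neg (show ¬ (j0 + 1 ≤ i ∧ p = m) by omega),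
                if_neg (show ¬ (j0 ≤ i ∧ p = m) by omega)]
        · simp only [if_neg him, if_neg hij0]
          rw [if_neg (show ¬ (j0 + 1 ≤ i ∧ p = m) by omega),
              if_neg (show ¬ (j0 ≤ i ∧ p = m) by omega)]

theorem pvOuter (coords : List (Int × Int × Int)) :
    ∀ (fuel m0 : Nat), fuel = coords.length - m0 →
    ∀ (d : PySem.Dict Int (List (List Int))), pvInv coords (pvGpart coords m0) d →
    pvInv coords (pvGpart coords coords.length)
      ((PySem.List.pyRange (m0 : Int) (coords.length : Int)).foldl (pvStepOuter coords) d) := by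
  intro fuel
  induction fuel with
  | zero =>
    intro m0 hfuel d h
    have hge : coords.length ≤ m0 := by omega
    rw [PySem.List.pyRange_one_eq_nil (by exact_mod_cast hge)]
    refine pvInv_congr h fun i hi p hp => ?_
    simp [pvGpart, show i < m0 by omega, hi]
  | succ fuel ih =>
    intro m0 hfuel d h
    have hm0 : m0 < coords.length := by omega
    rw [PySem.List.pyRange_one_cons (by exact_mod_cast hm0), List.foldl_cons]
    have hstep : pvStepOuter coords d (m0 : Int) =
        (PySem.List.pyRange ((m0 + 1 : Nat) : Int) (coords.length : Int)).foldl
          (pvStepInner coords (m0 : Int)) d := by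
      rw [pvStepOuter]
      norm_num
    rw [hstep]
    have hinner := pvInner coords m0 hm0 (coords.length - (m0 + 1)) (m0 + 1)
      (by omega) rfl _ d h
    have h' : pvInv coords (pvGpart coords (m0 + 1))
        ((PySem.List.pyRange ((m0 + 1 : Nat) : Int) (coords.length : Int)).foldl
          (pvStepInner coords (m0 : Int)) d) := by
      refine pvInv_congr hinner fun i hi p hp => ?_
      by_cases him : i = m0
      · by_cases hc : m0 ≤ p
        · simp [pvGpart, him, show m0 + 1 ≤ p + 1 by omega, show ¬ p < m0 by omega,
            pvGfin, show m0 < m0 + 1 by omega]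
        · simp [pvGpart, him, show ¬ m0 + 1 ≤ p + 1 by omega, show p < m0 by omega,
            pvGfin, show m0 < m0 + 1 by omega]
      · by_cases hge : m0 + 1 ≤ i
        · by_cases hpm : p = m0
          · simp [pvGpart, him, hpm, hge, show ¬ i < m0 + 1 by omega,
              show p < m0 + 1 by omega]
          · by_cases hplt : p < m0
            · simp [pvGpart, him, hpm, hge, show ¬ i < m0 by omega,
                show ¬ i < m0 + 1 by omega, hplt, show p < m0 + 1 by omega]
            · simp [pvGpart, him, hpm, hge, show ¬ i < m0 by omega,
                show ¬ i < m0 + 1 by omega, hplt, show ¬ p < m0 + 1 by omega]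
        · have hlt : i < m0 := by omega
          rw [if_neg him, if_neg (show ¬ (m0 + 1 ≤ i ∧ p = m0) by omega)]
          simp [pvGpart, hlt, show i < m0 + 1 by omega]
    have := ih (m0 + 1) (by omega) _ h'
    exact this

theorem pvInit (coords : List (Int × Int × Int)) :
    pvInv coords (pvGpart coords 0)
      ((PySem.List.pyRange 0 (coords.length : Int)).foldl
        (fun d i => d.insert i (List.replicate ((coords.length : Int) - 1).toNat []))
        PySem.Dict.empty) := by
  constructor
  · rw [PySem.Dict.items_foldl_insert_fresh _ (fun i => i)
      (fun _ => List.replicate ((coords.length : Int) - 1).toNat [])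
      PySem.Dict.empty (fun a _ => PySem.Dict.contains_empty a)
      (by simpa using PySem.List.nodup_pyRange_one 0 (coords.length : Int))]
    have hemp : (PySem.Dict.empty : PySem.Dict Int (List (List Int))).items = [] := rfl
    rw [hemp, List.nil_append, PySem.List.pyRange_zero_natCast, List.map_map]
    refine List.map_congr_left fun i _ => ?_
    refine Prod.ext rfl ?_
    show List.replicate ((coords.length : Int) - 1).toNat [] = _
    have h1 : ((coords.length : Int) - 1).toNat = coords.length - 1 := by omega
    rw [h1]
    have hconst : pvGpart coords 0 i = fun _ => ([] : List Int) := by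
      funext p; simp [pvGpart]
    rw [hconst, List.map_const', List.length_range]
  · exact PySem.Dict.nodup_keys_foldl_insert _ _ _ PySem.Dict.nodup_keys_empty

theorem pvB_eq (coords : List (Int × Int × Int)) :
    distance_signatures_from_coords_alt coords =
      (List.range coords.length).map (pvCanon coords) := by
  simp only [distance_signatures_from_coords_alt]
  have hshape : (fun (d : PySem.Dict Int (List (List Int))) (i : Int) =>
      (PySem.List.pyRange (i + 1) (coords.length : Int)).foldl
        (fun d j =>
          (d.insert i (PySem.List.pySetD (d.getD i []) (j - 1)
            (pvPairSig (PySem.List.pyGetD coords i (0, 0, 0)) (PySem.List.pyGetD coords j (0, 0, 0))))).insert j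
            (PySem.List.pySetD
              ((d.insert i (PySem.List.pySetD (d.getD i []) (j - 1)
                (pvPairSig (PySem.List.pyGetD coords i (0, 0, 0)) (PySem.List.pyGetD coords j (0, 0, 0))))).getD j [])
              i
              (pvPairSig (PySem.List.pyGetD coords i (0, 0, 0)) (PySem.List.pyGetD coords j (0, 0, 0)))))
        d) = pvStepOuter coords := rfl
  have hfin := pvOuter coords (coords.length) 0 (by omega) _ (pvInit coords)
  rw [show ((0 : Nat) : Int) = (0 : Int) from rfl] at hfin
  rw [hshape, hfin.1]
  refine List.map_congr_left fun i hi => ?_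
  have hi' : i < coords.length := List.mem_range.mp hi
  refine Prod.ext rfl ?_
  show (List.range (coords.length - 1)).map (pvGpart coords coords.length i) = (pvCanon coords i).2
  rw [← pvRow_bridge coords i hi']
  refine List.map_congr_left fun p _hp => ?_
  simp [pvGpart, hi']



-- ===== VERDICT (by name: the statement is the Claim_ definition above) =====
theorem distance_signatures_from_coords_spec : Claim_equal_distance_signatures_from_coords := by
  intro coords _
  unfold Spec_distance_signatures_from_coords
  rw [pvA_eq, pvB_eq]
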